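-- pv_equiv track=rewrite | github.com/thecr7guy2/cs336n-assignment-1 | cs336_basics/tokenizer/a.py | get_weighted_pairs
-- ===== SOURCE A (Python) =====
-- def form_pairs(text_in_bytes):
--     pairs={}
--     for i in range(0,len(text_in_bytes)-1):
--         pair = (text_in_bytes[i],text_in_bytes[i+1])
--         if pair in pairs:
--             pairs[pair] = pairs[pair] + 1
--         else:
--             pairs[pair] = 1
--     return pairs
--
-- def get_weighted_pairs(byte_freq_dict):
--     weighted_pairs = {}
--     for i in byte_freq_dict:
--         pairs = form_pairs(i[0])
--         for j in pairs.keys():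
--             if j in weighted_pairs:
--                 weighted_pairs[j] = weighted_pairs[j] + pairs[j] * i[1]
--             else:
--                 weighted_pairs[j] = pairs[j] * i[1]
--     return weighted_pairs
-- ===== SOURCE B (Python) =====
-- def get_weighted_pairs(byte_freq_dict):
--     # One direct accumulation pass: add the weight for every adjacent pair
--     # occurrence, instead of building a per-sequence count dict and merging.
--     weighted_pairs = {}
--     for seq, weight in byte_freq_dict:
--         for pair in zip(seq, seq[1:]):
--             weighted_pairs[pair] = weighted_pairs.get(pair, 0) + weight
--     return weighted_pairs
-- ===== Notes on version B (the rewrite author's own statement) =====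
-- stated objective: simpler
-- what changed: Replaced A's two-phase scheme (build a per-sequence pair-count dict via form_pairs, then merge it weighted into the global dict) by a single direct accumulation: iterate zip(seq, seq[1:]) and add the weight per pair occurrence, with no helper and no intermediate dict.
import Mathlib
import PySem

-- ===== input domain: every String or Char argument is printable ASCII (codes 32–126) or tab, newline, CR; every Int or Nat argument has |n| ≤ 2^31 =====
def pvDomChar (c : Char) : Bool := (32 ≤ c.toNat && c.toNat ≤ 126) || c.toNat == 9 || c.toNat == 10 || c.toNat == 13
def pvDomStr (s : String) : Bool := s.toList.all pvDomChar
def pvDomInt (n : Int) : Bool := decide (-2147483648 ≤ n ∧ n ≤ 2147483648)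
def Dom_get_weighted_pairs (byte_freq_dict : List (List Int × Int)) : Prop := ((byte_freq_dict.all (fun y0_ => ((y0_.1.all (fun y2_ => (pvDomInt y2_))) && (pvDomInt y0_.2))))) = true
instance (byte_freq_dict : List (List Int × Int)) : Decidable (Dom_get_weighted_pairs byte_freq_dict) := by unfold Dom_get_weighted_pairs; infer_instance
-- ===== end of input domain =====

-- B drops the form_pairs helper and its per-sequence count dict, accumulating the weight
-- directly for every adjacent pair occurrence (same result, simpler decomposition).

-- ===== PORT A =====
-- form_pairs: t[i]/t[i+1] with i in range(0, len(t)-1) is always in range, so pyGetD is exact here.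
def form_pairs (text_in_bytes : List Int) : PySem.Dict (Int × Int) Int :=
  (PySem.List.pyRange 0 (PySem.List.len text_in_bytes - 1)).foldl
    (fun pairs i =>
      let pair := (PySem.List.pyGetD text_in_bytes i 0, PySem.List.pyGetD text_in_bytes (i + 1) 0)
      if pairs.contains pair then pairs.insert pair (pairs.getD pair 0 + 1)
      else pairs.insert pair 1)
    PySem.Dict.empty

def get_weighted_pairs (byte_freq_dict : List (List Int × Int)) : List (Int × Int × Int) :=
  (byte_freq_dict.foldl
    (fun weighted_pairs i =>
      let pairs := form_pairs i.1
      pairs.keys.foldl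
        (fun wp j =>
          if wp.contains j then wp.insert j (wp.getD j 0 + pairs.getD j 0 * i.2)
          else wp.insert j (pairs.getD j 0 * i.2))
        weighted_pairs)
    PySem.Dict.empty).items.map (fun p => (p.1.1, p.1.2, p.2))

-- ===== PORT B =====
-- zip(seq, seq[1:]) is seq.zip (seq.drop 1) (the [1:] slice of a list is drop 1, exact).
def get_weighted_pairs_alt (byte_freq_dict : List (List Int × Int)) : List (Int × Int × Int) :=
  (byte_freq_dict.foldl
    (fun weighted_pairs sw =>
      (sw.1.zip (sw.1.drop 1)).foldl
        (fun wp pair => wp.insert pair (wp.getD pair 0 + sw.2))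
        weighted_pairs)
    PySem.Dict.empty).items.map (fun p => (p.1.1, p.1.2, p.2))

-- ===== PRECONDITION & SPEC =====
def Spec_get_weighted_pairs (byte_freq_dict : List (List Int × Int)) (out : List (Int × Int × Int)) : Prop := out = get_weighted_pairs_alt byte_freq_dict
instance (byte_freq_dict : List (List Int × Int)) (out : List (Int × Int × Int)) : Decidable (Spec_get_weighted_pairs byte_freq_dict out) := by unfold Spec_get_weighted_pairs; infer_instance

-- ===== CLAIM (what is proved, stated in full; the proofs are below) =====
def Claim_equal_get_weighted_pairs : Prop := ∀ (byte_freq_dict : List (List Int × Int)), Dom_get_weighted_pairs byte_freq_dict → Spec_get_weighted_pairs byte_freq_dict (get_weighted_pairs byte_freq_dict)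

-- ===== LEMMAS AND PROOFS =====

-- B's inner loop: add w once per occurrence.
def accW (w : Int) (d : PySem.Dict (Int × Int) Int) (L : List (Int × Int)) : PySem.Dict (Int × Int) Int :=
  L.foldl (fun d p => d.insert p (d.getD p 0 + w)) d

-- A's inner loop after rewriting: add cnt q * w once per distinct pair q.
def accC (cnt : (Int × Int) → Int) (w : Int) (d : PySem.Dict (Int × Int) Int)
    (S : List (Int × Int)) : PySem.Dict (Int × Int) Int :=
  S.foldl (fun d q => d.insert q (d.getD q 0 + cnt q * w)) d

lemma insert_items_pos (d : PySem.Dict (Int × Int) Int) (p : Int × Int) (v : Int)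
    (h : d.contains p = true) :
    (d.insert p v).items = d.items.map (fun e => if e.1 == p then (p, v) else e) := by
  simp only [PySem.Dict.insert, h, if_true]

lemma insert_items_neg (d : PySem.Dict (Int × Int) Int) (p : Int × Int) (v : Int)
    (h : d.contains p = false) :
    (d.insert p v).items = d.items ++ [(p, v)] := by
  simp only [PySem.Dict.insert, h, Bool.false_eq_true, if_false]

lemma dict_insert_insert_self (d : PySem.Dict (Int × Int) Int) (p : Int × Int) (a b : Int) :
    (d.insert p b).insert p a = d.insert p a := by
  apply PySem.Dict.ext
  have hc : (d.insert p b).contains p = true := by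
    rw [PySem.Dict.contains_insert]; simp
  rw [insert_items_pos _ _ _ hc]
  by_cases h : d.contains p = true
  · rw [insert_items_pos _ _ _ h, insert_items_pos _ _ _ h, List.map_map]
    apply List.map_congr_left
    intro e _
    by_cases hep : e.1 = p <;> simp [Function.comp, hep]
  · have h' : d.contains p = false := by simpa using h
    rw [insert_items_neg _ _ _ h', insert_items_neg _ _ _ h']
    have hall : ∀ e ∈ d.items, (e.1 == p) = false := by
      simpa [PySem.Dict.contains, List.any_eq_false] using h'
    simp only [List.map_append, List.map_cons, List.map_nil]
    rw [List.map_congr_left (fun e he => by rw [if_neg (by simp [hall e he])]), List.map_id']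
    simp

lemma dict_insert_comm (d : PySem.Dict (Int × Int) Int) (p q : Int × Int) (a v : Int)
    (hq : q ≠ p) (hp : d.contains p = true) :
    (d.insert p a).insert q v = (d.insert q v).insert p a := by
  apply PySem.Dict.ext
  have hpa : (d.insert p a).contains q = d.contains q := by
    rw [PySem.Dict.contains_insert]
    simp [beq_eq_false_iff_ne.mpr hq]
  have hqv : (d.insert q v).contains p = true := by
    rw [PySem.Dict.contains_insert]; simp [hp]
  rw [insert_items_pos _ _ _ hqv]
  by_cases h : d.contains q = true
  · rw [insert_items_pos _ _ _ (hpa.trans h), insert_items_pos _ _ _ hp,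
        insert_items_pos _ _ _ h, List.map_map, List.map_map]
    apply List.map_congr_left
    intro e _
    by_cases hep : e.1 = p
    · simp [Function.comp, hep, Ne.symm hq]
    · by_cases heq : e.1 = q <;> simp [Function.comp, hep, heq, hq]
  · have h' : d.contains q = false := by simpa using h
    rw [insert_items_neg _ _ _ (hpa.trans h'), insert_items_pos _ _ _ hp,
        insert_items_neg _ _ _ h']
    simp only [List.map_append, List.map_cons, List.map_nil]
    rw [if_neg (by simpa using hq)]

lemma accC_cons (cnt : (Int × Int) → Int) (w : Int) (d : PySem.Dict (Int × Int) Int)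
    (q : Int × Int) (S : List (Int × Int)) :
    accC cnt w d (q :: S) = accC cnt w (d.insert q (d.getD q 0 + cnt q * w)) S := rfl

lemma accC_append (cnt : (Int × Int) → Int) (w : Int) (d : PySem.Dict (Int × Int) Int)
    (S T : List (Int × Int)) :
    accC cnt w d (S ++ T) = accC cnt w (accC cnt w d S) T := List.foldl_append

lemma accW_append (w : Int) (d : PySem.Dict (Int × Int) Int) (L M : List (Int × Int)) :
    accW w d (L ++ M) = accW w (accW w d L) M := List.foldl_append

lemma getD_accC (cnt : (Int × Int) → Int) (w : Int) (S : List (Int × Int)) (d : PySem.Dict (Int × Int) Int)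
    (p : Int × Int) (hp : p ∉ S) : (accC cnt w d S).getD p 0 = d.getD p 0 := by
  induction S generalizing d with
  | nil => rfl
  | cons q S ih =>
    simp only [List.mem_cons, not_or] at hp
    rw [accC_cons, ih _ hp.2, PySem.Dict.getD_insert_of_ne _ _ _ hp.1]

lemma accC_congr (cnt cnt' : (Int × Int) → Int) (w : Int) (S : List (Int × Int))
    (d : PySem.Dict (Int × Int) Int) (h : ∀ q ∈ S, cnt' q = cnt q) :
    accC cnt' w d S = accC cnt w d S := by
  unfold accC
  exact PySem.List.foldl_congr_mem S _ _ d (fun acc x hx => by rw [h x hx])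

lemma accC_insert (cnt : (Int × Int) → Int) (w : Int) (p : Int × Int) (S : List (Int × Int))
    (d : PySem.Dict (Int × Int) Int) (a : Int) (hS : p ∉ S) (hd : d.contains p = true) :
    accC cnt w (d.insert p a) S = (accC cnt w d S).insert p a := by
  induction S generalizing d with
  | nil => rfl
  | cons q S ih =>
    simp only [List.mem_cons, not_or] at hS
    rw [accC_cons, accC_cons, PySem.Dict.getD_insert_of_ne _ _ _ (Ne.symm hS.1),
        dict_insert_comm d p q a _ (Ne.symm hS.1) hd]
    exact ih _ hS.2 (by rw [PySem.Dict.contains_insert]; simp [hd])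

lemma accC_bump (cnt cnt' : (Int × Int) → Int) (w : Int) (p : Int × Int)
    (h1 : cnt' p = cnt p + 1) (h2 : ∀ q, q ≠ p → cnt' q = cnt q) :
    ∀ (S : List (Int × Int)) (d : PySem.Dict (Int × Int) Int), S.Nodup → p ∈ S →
      accC cnt' w d S = (accC cnt w d S).insert p ((accC cnt w d S).getD p 0 + w) := by
  intro S
  induction S with
  | nil => intro d _ h; cases h
  | cons q S ih =>
    intro d hnd hmem
    rcases List.nodup_cons.mp hnd with ⟨hqS, hndS⟩
    by_cases hqp : p = q
    · subst hqp
      have hpS : p ∉ S := hqS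
      rw [accC_cons, accC_cons]
      have hcont : (d.insert p (d.getD p 0 + cnt p * w)).contains p = true := by
        rw [PySem.Dict.contains_insert]; simp
      calc accC cnt' w (d.insert p (d.getD p 0 + cnt' p * w)) S
          = accC cnt w (d.insert p (d.getD p 0 + cnt' p * w)) S :=
            accC_congr cnt cnt' w S _ (fun q hq => h2 q (fun he => hpS (he ▸ hq)))
        _ = accC cnt w ((d.insert p (d.getD p 0 + cnt p * w)).insert p
              ((d.getD p 0 + cnt p * w) + w)) S := by
            rw [dict_insert_insert_self]; congr 2; rw [h1]; ring
        _ = (accC cnt w (d.insert p (d.getD p 0 + cnt p * w)) S).insert p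
              ((d.getD p 0 + cnt p * w) + w) :=
            accC_insert cnt w p S _ _ hpS hcont
        _ = (accC cnt w (d.insert p (d.getD p 0 + cnt p * w)) S).insert p
              ((accC cnt w (d.insert p (d.getD p 0 + cnt p * w)) S).getD p 0 + w) := by
            rw [getD_accC cnt w S _ p hpS, PySem.Dict.getD_insert_self]
    · have hpS : p ∈ S := by
        rcases List.mem_cons.mp hmem with h | h
        · exact absurd h hqp
        · exact h
      rw [accC_cons, accC_cons, h2 q (Ne.symm hqp)]
      exact ih _ hndS hpS

lemma ofList_append_singleton (M : List (Int × Int)) (p : Int × Int) :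
    PySem.Set.ofList (M ++ [p]) =
      if p ∈ M then PySem.Set.ofList M else PySem.Set.ofList M ++ [p] := by
  have h1 : PySem.Set.ofList (M ++ [p]) = (PySem.Set.ofList M).add p := by
    simp [PySem.Set.ofList, List.foldl_append]
  rw [h1, PySem.Set.add]
  by_cases hp : p ∈ M
  · rw [if_pos (by simp [PySem.Set.mem_ofList, hp]), if_pos hp]
  · rw [if_neg (by simp [PySem.Set.mem_ofList, hp]), if_neg hp]

lemma accW_singleton (w : Int) (e : PySem.Dict (Int × Int) Int) (p : Int × Int) :
    accW w e [p] = e.insert p (e.getD p 0 + w) := rfl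

lemma accC_singleton (cnt : (Int × Int) → Int) (w : Int) (e : PySem.Dict (Int × Int) Int)
    (p : Int × Int) : accC cnt w e [p] = e.insert p (e.getD p 0 + cnt p * w) := rfl

lemma accW_eq (w : Int) (L : List (Int × Int)) (d : PySem.Dict (Int × Int) Int) :
    accW w d L = accC (fun q => (L.count q : Int)) w d (PySem.Set.ofList L) := by
  induction L using List.reverseRecOn generalizing d with
  | nil => rfl
  | append_singleton M p ih =>
    rw [accW_append, accW_singleton, ofList_append_singleton]
    by_cases hp : p ∈ M
    · rw [if_pos hp,
          accC_bump (fun q => (M.count q : Int)) (fun q => ((M ++ [p]).count q : Int)) w p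
            (by simp [List.count_append])
            (fun q hqp => by
              simp [List.count_append,
                    List.count_eq_zero_of_not_mem (show q ∉ [p] by simpa using hqp)])
            (PySem.Set.ofList M) d (PySem.Set.nodup_ofList M)
            ((PySem.Set.mem_ofList M p).mpr hp),
          ih]
    · rw [if_neg hp, accC_append, accC_singleton,
          accC_congr (fun q => (M.count q : Int)) (fun q => ((M ++ [p]).count q : Int)) w
            (PySem.Set.ofList M) d
            (fun q hq => by
              have hqp : q ≠ p := fun he => hp (he ▸ (PySem.Set.mem_ofList M q).mp hq)
              simp [List.count_append,
                    List.count_eq_zero_of_not_mem (show q ∉ [p] by simpa using hqp)]),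
          ih]
      have hcnt : ((M ++ [p]).count p : Int) = 1 := by
        simp [List.count_append, List.count_eq_zero_of_not_mem hp]
      rw [hcnt, one_mul]

lemma map_range_adj (t : List Int) :
    (PySem.List.pyRange 0 (PySem.List.len t - 1)).map
      (fun i => (PySem.List.pyGetD t i 0, PySem.List.pyGetD t (i + 1) 0)) = t.zip (t.drop 1) := by
  rw [PySem.List.pyRange_one, List.map_map]
  have hn : ((PySem.List.len t : Int) - 1 - 0).toNat = t.length - 1 := by
    simp [PySem.List.len]
  rw [hn]
  apply List.ext_getElem
  · simp [List.length_zip]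
  · intro i h1 h2
    have hi : i < t.length - 1 := by simpa using h1
    have hi1 : i < t.length := by omega
    have hi2 : 1 + i < t.length := by omega
    simp only [List.getElem_map, List.getElem_range, Function.comp_apply, List.getElem_zip,
      List.getElem_drop, zero_add]
    have e2 : ((i : Int)) + 1 = (((i + 1 : Nat)) : Int) := by push_cast; ring
    rw [e2, PySem.List.pyGetD_natCast, PySem.List.pyGetD_natCast,
        List.getD_eq_getElem t 0 hi1, List.getD_eq_getElem t 0 (by omega : i + 1 < t.length)]
    simp [Nat.add_comm]

lemma form_pairs_eq (t : List Int) :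
    form_pairs t = PySem.Dict.counter (t.zip (t.drop 1)) := by
  show (PySem.List.pyRange 0 (PySem.List.len t - 1)).foldl
      (fun pairs i =>
        (fun (d : PySem.Dict (Int × Int) Int) x =>
          if d.contains x then d.insert x (d.getD x 0 + 1) else d.insert x 1) pairs
          ((fun i => (PySem.List.pyGetD t i 0, PySem.List.pyGetD t (i + 1) 0)) i))
      PySem.Dict.empty = _
  rw [← List.foldl_map (f := fun i => (PySem.List.pyGetD t i 0, PySem.List.pyGetD t (i + 1) 0))
        (g := fun (d : PySem.Dict (Int × Int) Int) x =>
          if d.contains x then d.insert x (d.getD x 0 + 1) else d.insert x 1)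
        (l := PySem.List.pyRange 0 (PySem.List.len t - 1)) (init := PySem.Dict.empty),
      map_range_adj,
      PySem.List.foldl_congr_mem _ _
        (fun (d : PySem.Dict (Int × Int) Int) x => d.insert x (d.getD x 0 + 1)) _
        (fun acc x _ => by
          by_cases h : acc.contains x = true
          · simp [h]
          · have h' : acc.contains x = false := by simpa using h
            simp [h', PySem.Dict.getD_of_not_contains acc _ h']),
      PySem.Dict.foldl_insert_getD_add_one_eq_counter]


-- ===== VERDICT (by name: the statement is the Claim_ definition above) =====
theorem get_weighted_pairs_spec : Claim_equal_get_weighted_pairs := by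
  intro bfd _
  unfold Spec_get_weighted_pairs get_weighted_pairs get_weighted_pairs_alt
  congr 2
  apply PySem.List.foldl_congr_mem
  intro wp i _
  show (form_pairs i.1).keys.foldl _ wp = accW i.2 wp (i.1.zip (i.1.drop 1))
  rw [form_pairs_eq, PySem.Dict.keys_counter,
      PySem.List.foldl_congr_mem _ _
        (fun (d : PySem.Dict (Int × Int) Int) j =>
          d.insert j (d.getD j 0 + ((i.1.zip (i.1.drop 1)).count j : Int) * i.2)) _
        (fun acc j _ => by
          rw [PySem.Dict.getD_counter]
          by_cases h : acc.contains j = true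
          · simp [h]
          · have h' : acc.contains j = false := by simpa using h
            simp [h', PySem.Dict.getD_of_not_contains acc _ h']),
      show ∀ S, (PySem.Set.ofList S : List (Int × Int)).foldl
          (fun (d : PySem.Dict (Int × Int) Int) j =>
            d.insert j (d.getD j 0 + ((i.1.zip (i.1.drop 1)).count j : Int) * i.2)) wp
        = accC (fun q => ((i.1.zip (i.1.drop 1)).count q : Int)) i.2 wp (PySem.Set.ofList S)
        from fun S => rfl,
      ← accW_eq]
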